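-- pv_equiv track=rewrite | github.com/vigitia/IRPenTracking | demo_applications/documents_demo/AnalogueDigitalDocumentsDemo.py | list_to_points_list
-- ===== SOURCE A (Python) =====
-- def list_to_points_list(list_of_x_y_coords):
--     points_list = []
--
--     points_x = list_of_x_y_coords[::2]
--     points_y = list_of_x_y_coords[1::2]
--
--     for i in range(len(points_x)):
--         point = (int(points_x[i]), int(points_y[i]))
--         points_list.append(point)
--
--     return points_list
-- ===== SOURCE B (Python) =====
-- def list_to_points_list(list_of_x_y_coords):
--     # Pair consecutive elements directly with iterator pairing:
--     # no intermediate parallel slice lists, no index arithmetic.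
--     it = iter(list_of_x_y_coords)
--     return [(int(x), int(y)) for x, y in zip(it, it)]
-- ===== Notes on version B (the rewrite author's own statement) =====
-- stated objective: idiomatic
-- what changed: Replaces the two parallel step-2 slice lists and the index loop by a single pass that pairs consecutive elements (iterator pairing, two at a time).
import Mathlib
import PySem

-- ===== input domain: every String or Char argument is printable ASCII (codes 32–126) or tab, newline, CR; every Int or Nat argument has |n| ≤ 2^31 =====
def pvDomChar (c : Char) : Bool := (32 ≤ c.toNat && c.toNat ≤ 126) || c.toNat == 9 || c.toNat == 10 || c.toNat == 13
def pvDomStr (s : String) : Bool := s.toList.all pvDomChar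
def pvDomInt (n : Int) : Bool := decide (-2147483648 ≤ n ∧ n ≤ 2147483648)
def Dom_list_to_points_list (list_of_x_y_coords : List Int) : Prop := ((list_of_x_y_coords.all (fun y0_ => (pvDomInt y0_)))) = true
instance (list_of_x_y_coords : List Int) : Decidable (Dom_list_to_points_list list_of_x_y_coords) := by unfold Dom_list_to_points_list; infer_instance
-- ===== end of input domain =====

-- B replaces A's two step-2 slice lists and index loop by a single pass pairing consecutive elements two at a time (objective: idiomatic).

-- ===== PORT A =====
-- points_x = lst[::2]; points_y = lst[1::2]; for i in range(len(points_x)): append (px[i], py[i]).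
-- pyGetD … 0 stands in for the indexing that raises on odd length; Pre_ excludes exactly those inputs.
def list_to_points_list (list_of_x_y_coords : List Int) : List (Int × Int) :=
  let points_x := (PySem.List.slice? list_of_x_y_coords none none 2).getD []
  let points_y := (PySem.List.slice? list_of_x_y_coords (some 1) none 2).getD []
  (PySem.List.pyRange 0 points_x.length 1).foldl
    (fun acc i => acc ++ [(PySem.List.pyGetD points_x i 0, PySem.List.pyGetD points_y i 0)]) []

-- ===== PORT B =====
-- zip(it, it) over one iterator consumes the list two elements at a time; ported as the structural two-at-a-time recursion.
def list_to_points_list_alt (list_of_x_y_coords : List Int) : List (Int × Int) :=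
  match list_of_x_y_coords with
  | x :: y :: rest => (x, y) :: list_to_points_list_alt rest
  | _ => []

-- ===== PRECONDITION & SPEC =====
-- A raises IndexError on odd-length input (points_y is one element shorter than points_x); Pre_ excludes exactly those.
def Pre_list_to_points_list (list_of_x_y_coords : List Int) : Prop :=
  list_of_x_y_coords.length % 2 = 0
instance (list_of_x_y_coords : List Int) : Decidable (Pre_list_to_points_list list_of_x_y_coords) := by unfold Pre_list_to_points_list; infer_instance
def pvWitness_list_to_points_list : List Int := [10, 20, 30, 40]

def Spec_list_to_points_list (list_of_x_y_coords : List Int) (out : List (Int × Int)) : Prop := out = list_to_points_list_alt list_of_x_y_coords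
instance (list_of_x_y_coords : List Int) (out : List (Int × Int)) : Decidable (Spec_list_to_points_list list_of_x_y_coords out) := by unfold Spec_list_to_points_list; infer_instance

-- ===== CLAIM (what is proved, stated in full; the proofs are below) =====
def Claim_equal_list_to_points_list : Prop := ∀ (list_of_x_y_coords : List Int), Dom_list_to_points_list list_of_x_y_coords → Pre_list_to_points_list list_of_x_y_coords → Spec_list_to_points_list list_of_x_y_coords (list_to_points_list list_of_x_y_coords)

-- ===== LEMMAS AND PROOFS =====

-- the elements of xs at even indices, two at a time
def pvEvens {α : Type} : List α → List α
  | [] => []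
  | [x] => [x]
  | x :: _ :: r => x :: pvEvens r

theorem pv_evens_length {α : Type} (xs : List α) : (pvEvens xs).length = (xs.length + 1) / 2 := by
  induction xs using pvEvens.induct with
  | case1 => simp [pvEvens]
  | case2 x => simp [pvEvens]
  | case3 x y r ih => simp only [pvEvens, List.length_cons, ih]; omega

theorem pv_filterMap_range_evens {α : Type} (xs : List α) :
    (List.range ((xs.length + 1) / 2)).filterMap (fun k => xs[2 * k]?) = pvEvens xs := by
  induction xs using pvEvens.induct with
  | case1 => simp [pvEvens]
  | case2 x => simp [pvEvens]
  | case3 x y r ih =>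
    have hlen : ((x :: y :: r).length + 1) / 2 = (r.length + 1) / 2 + 1 := by
      simp only [List.length_cons]; omega
    rw [hlen, List.range_succ_eq_map, List.filterMap_cons, List.filterMap_map]
    have hcomp : (fun k => (x :: y :: r)[2 * k]?) ∘ Nat.succ = fun k => r[2 * k]? := by
      funext k
      show (x :: y :: r)[2 * (k + 1)]? = r[2 * k]?
      have h2 : 2 * (k + 1) = 2 * k + 1 + 1 := by omega
      rw [h2]; simp
    rw [hcomp, ih]
    simp [pvEvens]

theorem pv_slice_two (xs : List Int) :
    PySem.List.slice? xs none none 2 = some (pvEvens xs) := by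
  rw [← pv_filterMap_range_evens]
  simp only [PySem.List.slice?, PySem.List.sliceIndices]
  norm_num
  have hcount : (if 0 < xs.length then (((xs.length : Int) + 2 - 1) / 2).toNat else 0) = (xs.length + 1) / 2 := by
    by_cases hn : 0 < xs.length <;> simp only [hn, if_true, if_false] <;> omega
  have hf : (fun k : ℕ => xs[(2 * (k : Int)).toNat]?) = fun k : ℕ => xs[2 * k]? := by
    funext k
    have h2 : ((2 : Int) * (k : Int)).toNat = 2 * k := by omega
    rw [h2]
  rw [hcount, hf]

theorem pv_slice_one_two (xs : List Int) :
    PySem.List.slice? xs (some 1) none 2 = some (pvEvens xs.tail) := by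
  cases xs with
  | nil => decide
  | cons x t =>
    rw [List.tail_cons, ← pv_filterMap_range_evens]
    simp only [PySem.List.slice?, PySem.List.sliceIndices]
    norm_num
    have hcount : (if 0 < t.length then (((t.length : Int) + 2 - 1) / 2).toNat else 0) = (t.length + 1) / 2 := by
      by_cases hn : 0 < t.length <;> simp only [hn, if_true, if_false] <;> omega
    have hf : (fun k : ℕ => (x :: t)[((1:Int) + 2 * (k : Int)).toNat]?) = fun k : ℕ => t[2 * k]? := by
      funext k
      have h2 : ((1:Int) + 2 * (k : Int)).toNat = 2 * k + 1 := by omega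
      rw [h2]
      have h3 : 1 + 2 * k = 2 * k + 1 := by omega
      simp
    rw [hcount, hf]

theorem pv_alt_zip (xs : List Int) :
    list_to_points_list_alt xs = (pvEvens xs).zip (pvEvens xs.tail) := by
  induction xs using pvEvens.induct with
  | case1 => simp [pvEvens, list_to_points_list_alt]
  | case2 x => simp [pvEvens, list_to_points_list_alt]
  | case3 x y r ih =>
    cases r with
    | nil => simp [pvEvens, list_to_points_list_alt]
    | cons z t =>
      simp only [list_to_points_list_alt, pvEvens, List.tail_cons, List.zip_cons_cons] at *
      rw [ih]

theorem pv_fold_zip (px py : List Int) (h : px.length = py.length) :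
    (PySem.List.pyRange 0 (px.length : Int) 1).foldl
      (fun acc i => acc ++ [(PySem.List.pyGetD px i 0, PySem.List.pyGetD py i 0)]) []
    = px.zip py := by
  have hr : PySem.List.pyRange 0 (px.length : Int) 1 = List.map (fun k : ℕ => (k : Int)) (List.range px.length) := by
    rw [PySem.List.pyRange_one]
    simp only [Int.sub_zero, Int.toNat_natCast]
    exact List.map_congr_left (fun k _ => by omega)
  rw [hr, List.foldl_map]
  have hfold : ∀ (g : ℕ → Int × Int) (l : List ℕ) (acc : List (Int × Int)),
      l.foldl (fun a k => a ++ [g k]) acc = acc ++ l.map g := by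
    intro g l
    induction l with
    | nil => intro acc; simp
    | cons k t ih => intro acc; simp [ih]
  rw [hfold]
  rw [List.nil_append]
  apply List.ext_getElem
  · simp [h]
  · intro i h1 h2
    have hip : i < px.length := by simpa using h1
    have hiy : i < py.length := by omega
    simp only [List.getElem_map, List.getElem_range, List.getElem_zip]
    rw [PySem.List.pyGetD_natCast, PySem.List.pyGetD_natCast]
    simp [hip, hiy]

-- ===== VERDICT (by name: the statement is the Claim_ definition above) =====
theorem list_to_points_list_spec : Claim_equal_list_to_points_list := by
  intro xs _ hpre
  unfold Spec_list_to_points_list list_to_points_list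
  rw [pv_slice_two, pv_slice_one_two]
  simp only [Option.getD_some]
  rw [pv_fold_zip, ← pv_alt_zip]
  rw [pv_evens_length, pv_evens_length]
  unfold Pre_list_to_points_list at hpre
  rcases xs with _ | ⟨x, t⟩
  · simp
  · simp only [List.tail_cons, List.length_cons] at *
    omega
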